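-- pv_equiv track=rewrite | github.com/jaanos/PSA1 | naloge/2016/dn2/JureHostnik/maxindepset.py | independentNeighbours
-- ===== SOURCE A (Python) =====
-- def independentSets(k, index = None, n = None):
--     if n is None:
--         n = k // 2
--     if index is None:
--         index = range(k)
--     s = []
--     if k <= 0:
--         return [[]]
--     elif k == 1:
--         return [[0], [1]]
--     elif k == 2:
--         return [[0, 0], [0, 1], [1, 0]]
--     else:
--         for m in independentSets(k-1, index = None, n = None):
--             s.append([0] + m)
--         for m in independentSets(k-2, index = None, n = None):
--             s.append([1, 0] + m)
--         return s
--
-- def cycleIndependentSets(k, index = None, n = None):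
--     if n is None:
--         n = k // 2
--     if index is None:
--         index = range(k)
--     s = []
--     if k <= 0:
--         return [[]]
--     if k == 1:
--         return [[0], [1]]
--     elif k == 2:
--         return [[0, 0], [0, 1], [1, 0]]
--     elif k == 3:
--         return [[0, 0, 0], [0, 0, 1], [0, 1, 0], [1, 0, 0]]
--     else:
--         for m in independentSets(k-1, index = None, n = None):
--             s.append([0] + m)
--         for m in independentSets(k-3, index = None, n = None):
--             s.append([1, 0] + m + [0])
--         return s
--
-- def independentNeighbours(s):
--     k = len(s)
--     n = []
--     for i in cycleIndependentSets(k):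
--         for j, e in enumerate(i):
--             if e*s[j] == 1:
--                 break
--         else:
--             n.append(i)
--     return n
-- ===== SOURCE B (Python) =====
-- def independentNeighbours(s):
--     # Generate only the s-compatible cycle independent sets directly,
--     # pruning every 1-branch whose absolute position p has s[p] == 1.
--     def ok(p):
--         return s[p] != 1
--
--     def ind(k, p):
--         if k <= 0:
--             return [[]]
--         if k == 1:
--             return [[0]] + ([[1]] if ok(p) else [])
--         if k == 2:
--             return ([[0, 0]] + ([[0, 1]] if ok(p + 1) else [])
--                     + ([[1, 0]] if ok(p) else []))
--         r = [[0] + m for m in ind(k - 1, p + 1)]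
--         if ok(p):
--             r += [[1, 0] + m for m in ind(k - 2, p + 2)]
--         return r
--
--     k = len(s)
--     if k <= 0:
--         return [[]]
--     if k == 1:
--         return [[0]] + ([[1]] if ok(0) else [])
--     if k == 2:
--         return ([[0, 0]] + ([[0, 1]] if ok(1) else [])
--                 + ([[1, 0]] if ok(0) else []))
--     if k == 3:
--         return ([[0, 0, 0]] + ([[0, 0, 1]] if ok(2) else [])
--                 + ([[0, 1, 0]] if ok(1) else []) + ([[1, 0, 0]] if ok(0) else []))
--     r = [[0] + m for m in ind(k - 1, 1)]
--     if ok(0):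
--         r += [[1, 0] + m + [0] for m in ind(k - 3, 2)]
--     return r
-- ===== Notes on version B (the rewrite author's own statement) =====
-- stated objective: alternative
-- what changed: B generates only the s-compatible cycle independent sets by one pruned recursion carrying the absolute position, instead of enumerating all cycle independent sets and then filtering them against s.
import Mathlib
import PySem

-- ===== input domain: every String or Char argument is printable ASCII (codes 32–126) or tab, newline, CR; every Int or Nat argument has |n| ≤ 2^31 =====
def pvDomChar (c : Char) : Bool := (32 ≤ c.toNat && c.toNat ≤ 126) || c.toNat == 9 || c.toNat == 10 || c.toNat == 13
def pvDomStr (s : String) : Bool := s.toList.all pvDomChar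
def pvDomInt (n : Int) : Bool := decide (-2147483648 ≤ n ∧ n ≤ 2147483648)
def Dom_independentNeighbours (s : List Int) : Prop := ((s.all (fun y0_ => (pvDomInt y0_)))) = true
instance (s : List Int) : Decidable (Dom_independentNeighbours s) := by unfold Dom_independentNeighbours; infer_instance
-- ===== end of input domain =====

-- B generates only the s-compatible cycle independent sets (pruning 1-branches at
-- positions where s is 1) instead of enumerating all sets and filtering; same output.

-- ===== PORT A =====
-- independentSets(k) (index/n arguments are unused by the recursion and dropped)
def pvIndSetsA : Nat → List (List Int)
  | 0 => [[]]
  | 1 => [[0], [1]]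
  | 2 => [[0, 0], [0, 1], [1, 0]]
  | (n+3) =>
      ((pvIndSetsA (n+2)).map (fun m => 0 :: m)) ++
      ((pvIndSetsA (n+1)).map (fun m => 1 :: 0 :: m))

-- cycleIndependentSets(k)
def pvCycSetsA : Nat → List (List Int)
  | 0 => [[]]
  | 1 => [[0], [1]]
  | 2 => [[0, 0], [0, 1], [1, 0]]
  | 3 => [[0, 0, 0], [0, 0, 1], [0, 1, 0], [1, 0, 0]]
  | (n+4) =>
      ((pvIndSetsA (n+3)).map (fun m => 0 :: m)) ++
      ((pvIndSetsA (n+1)).map (fun m => 1 :: 0 :: (m ++ [0])))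

-- the inner for/else loop: True = no j with e*s[j]==1 (the 'else: append' case).
-- s[j] is read with pyGet?; .getD 0 is never taken since j < len i = len s.
def pvCheckA (s : List Int) : List Int → Nat → Bool
  | [], _ => true
  | e :: rest, j =>
      if e * ((PySem.List.pyGet? s (Int.ofNat j)).getD 0) == 1 then false
      else pvCheckA s rest (j+1)

def independentNeighbours (s : List Int) : List (List Int) :=
  (pvCycSetsA s.length).filter (fun i => pvCheckA s i 0)

-- ===== PORT B =====
-- ok(p): s[p] != 1 (always in range when called)
def pvOkB (s : List Int) (p : Nat) : Bool :=
  !decide (s[p]?.getD 0 = 1)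

-- ind(k, p): s-compatible independent sets of a path of length k at absolute offset p
def pvIndB (s : List Int) : Nat → Nat → List (List Int)
  | 0, _ => [[]]
  | 1, p => [[0]] ++ (if pvOkB s p then [[1]] else [])
  | 2, p => [[0, 0]] ++ (if pvOkB s (p+1) then [[0, 1]] else [])
                     ++ (if pvOkB s p then [[1, 0]] else [])
  | (n+3), p =>
      ((pvIndB s (n+2) (p+1)).map (fun m => 0 :: m)) ++
      (if pvOkB s p then (pvIndB s (n+1) (p+2)).map (fun m => 1 :: 0 :: m) else [])

def independentNeighbours_alt (s : List Int) : List (List Int) :=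
  match s.length with
  | 0 => [[]]
  | 1 => [[0]] ++ (if pvOkB s 0 then [[1]] else [])
  | 2 => [[0, 0]] ++ (if pvOkB s 1 then [[0, 1]] else [])
                  ++ (if pvOkB s 0 then [[1, 0]] else [])
  | 3 => [[0, 0, 0]] ++ (if pvOkB s 2 then [[0, 0, 1]] else [])
                     ++ (if pvOkB s 1 then [[0, 1, 0]] else [])
                     ++ (if pvOkB s 0 then [[1, 0, 0]] else [])
  | (n+4) =>
      ((pvIndB s (n+3) 1).map (fun m => 0 :: m)) ++
      (if pvOkB s 0 then (pvIndB s (n+1) 2).map (fun m => 1 :: 0 :: (m ++ [0])) else [])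

-- ===== PRECONDITION & SPEC =====
def Spec_independentNeighbours (s : List Int) (out : List (List Int)) : Prop := out = independentNeighbours_alt s
instance (s : List Int) (out : List (List Int)) : Decidable (Spec_independentNeighbours s out) := by unfold Spec_independentNeighbours; infer_instance

-- ===== CLAIM (what is proved, stated in full; the proofs are below) =====
def Claim_equal_independentNeighbours : Prop := ∀ (s : List Int), Dom_independentNeighbours s → Spec_independentNeighbours s (independentNeighbours s)

-- ===== LEMMAS AND PROOFS =====

theorem pvCheckA_nil (s : List Int) (j : Nat) : pvCheckA s [] j = true := rfl

theorem pvCheckA_cons_zero (s : List Int) (m : List Int) (j : Nat) :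
    pvCheckA s (0 :: m) j = pvCheckA s m (j+1) := by
  simp [pvCheckA]

theorem pvCheckA_cons_one (s : List Int) (m : List Int) (j : Nat) :
    pvCheckA s (1 :: m) j = (pvOkB s j && pvCheckA s m (j+1)) := by
  by_cases h : s[j]?.getD 0 = 1 <;> simp [pvCheckA, pvOkB, h]

theorem pvCheckA_append_zero (s : List Int) (m : List Int) (j : Nat) :
    pvCheckA s (m ++ [0]) j = pvCheckA s m j := by
  induction m generalizing j with
  | nil => simp [pvCheckA]
  | cons e rest ih =>
      simp only [List.cons_append, pvCheckA]
      split <;> simp [ih]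

theorem pvFilter_map_cons_zero (s : List Int) (l : List (List Int)) (j : Nat) :
    (l.map (fun m => (0 : Int) :: m)).filter (fun i => pvCheckA s i j)
      = (l.filter (fun m => pvCheckA s m (j+1))).map (fun m => (0 : Int) :: m) := by
  rw [List.filter_map]
  have hz : (fun i => pvCheckA s i j) ∘ (fun m => (0 : Int) :: m)
      = fun m => pvCheckA s m (j+1) := by
    funext m; simp [Function.comp, pvCheckA_cons_zero]
  rw [hz]

theorem pvInd_filter (s : List Int) (k p : Nat) :
    (pvIndSetsA k).filter (fun i => pvCheckA s i p) = pvIndB s k p := by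
  induction k using Nat.strong_induction_on generalizing p with
  | _ k ih =>
    match k with
    | 0 => rfl
    | 1 =>
        by_cases h : pvOkB s p <;>
          simp [pvIndSetsA, pvIndB, pvCheckA_cons_zero,
            pvCheckA_cons_one, pvCheckA_nil, h]
    | 2 =>
        by_cases h0 : pvOkB s p <;> by_cases h1 : pvOkB s (p+1) <;>
          simp [pvIndSetsA, pvIndB, pvCheckA_cons_zero,
            pvCheckA_cons_one, pvCheckA_nil, h0, h1]
    | (n+3) =>
        simp only [pvIndSetsA, pvIndB, List.filter_append]
        rw [pvFilter_map_cons_zero, ih (n+2) (by omega)]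
        rw [List.filter_map]
        have hone : (fun i => pvCheckA s i p) ∘ (fun m => (1 : Int) :: (0 : Int) :: m)
            = fun m => (pvOkB s p && pvCheckA s m (p+2)) := by
          funext m
          simp only [Function.comp, pvCheckA_cons_one, pvCheckA_cons_zero]
        rw [hone]
        by_cases h : pvOkB s p
        · simp [h, ih (n+1) (by omega)]
        · simp [h]

theorem pvCyc_filter (s : List Int) (k : Nat) :
    (pvCycSetsA k).filter (fun i => pvCheckA s i 0)
      = match k with
        | 0 => [[]]
        | 1 => [[0]] ++ (if pvOkB s 0 then [[1]] else [])
        | 2 => [[0, 0]] ++ (if pvOkB s 1 then [[0, 1]] else [])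
                        ++ (if pvOkB s 0 then [[1, 0]] else [])
        | 3 => [[0, 0, 0]] ++ (if pvOkB s 2 then [[0, 0, 1]] else [])
                           ++ (if pvOkB s 1 then [[0, 1, 0]] else [])
                           ++ (if pvOkB s 0 then [[1, 0, 0]] else [])
        | (n+4) =>
            ((pvIndB s (n+3) 1).map (fun m => 0 :: m)) ++
            (if pvOkB s 0 then (pvIndB s (n+1) 2).map (fun m => 1 :: 0 :: (m ++ [0])) else []) := by
  match k with
  | 0 => rfl
  | 1 =>
      by_cases h : pvOkB s 0 <;>
        simp [pvCycSetsA, pvCheckA_cons_zero,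
          pvCheckA_cons_one, pvCheckA_nil, h]
  | 2 =>
      by_cases h0 : pvOkB s 0 <;> by_cases h1 : pvOkB s 1 <;>
        simp [pvCycSetsA, pvCheckA_cons_zero,
          pvCheckA_cons_one, pvCheckA_nil, h0, h1]
  | 3 =>
      by_cases h0 : pvOkB s 0 <;> by_cases h1 : pvOkB s 1 <;>
        by_cases h2 : pvOkB s 2 <;>
        simp [pvCycSetsA, pvCheckA_cons_zero,
          pvCheckA_cons_one, pvCheckA_nil, h0, h1, h2]
  | (n+4) =>
      simp only [pvCycSetsA, List.filter_append]
      rw [pvFilter_map_cons_zero, pvInd_filter s (n+3) 1]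
      rw [List.filter_map]
      have hone : (fun i => pvCheckA s i 0) ∘ (fun m => (1 : Int) :: (0 : Int) :: (m ++ [0]))
          = fun m => (pvOkB s 0 && pvCheckA s m 2) := by
        funext m
        simp only [Function.comp, pvCheckA_cons_one, pvCheckA_cons_zero,
          pvCheckA_append_zero]
      rw [hone]
      by_cases h : pvOkB s 0
      · simp [h, pvInd_filter s (n+1) 2]
      · simp [h]

-- ===== VERDICT (by name: the statement is the Claim_ definition above) =====
theorem independentNeighbours_spec : Claim_equal_independentNeighbours := by
  intro s _
  show independentNeighbours s = independentNeighbours_alt s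
  rw [independentNeighbours, independentNeighbours_alt, pvCyc_filter]
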